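-- pv_equiv track=rewrite | github.com/DanielePasotto/NLP_Second_Assignment_VR504755 | second_assignment.py | calculate_sentence_scores
-- ===== SOURCE A (Python) =====
-- def calculate_sentence_scores(sentences, words):
--     sentence_scores = {}
--     for sentence in sentences:
--         for word in words:
--             if word in sentence.lower():
--                 if sentence in sentence_scores:
--                     sentence_scores[sentence] += 1
--                 else:
--                     sentence_scores[sentence] = 1
--
--     return sentence_scores
-- ===== SOURCE B (Python) =====
-- def calculate_sentence_scores(sentences, words):
--     # Count each distinct sentence once, lowercase it once, then scale by multiplicity.
--     multiplicity = {}
--     for sentence in sentences: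
--         multiplicity[sentence] = multiplicity.get(sentence, 0) + 1
--     scores = {}
--     for sentence, mult in multiplicity.items():
--         low = sentence.lower()
--         hits = 0
--         for word in words:
--             if word in low:
--                 hits += 1
--         if hits:
--             scores[sentence] = hits * mult
--     return scores
-- ===== Notes on version B (the rewrite author's own statement) =====
-- stated objective: faster
-- what changed: B deduplicates sentences with a multiplicity map, lowercases each distinct sentence once and scans the word list once per distinct sentence, multiplying by multiplicity, instead of A's per-(sentence,word) scan that recomputes sentence.lower() for every word.
import Mathlib
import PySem

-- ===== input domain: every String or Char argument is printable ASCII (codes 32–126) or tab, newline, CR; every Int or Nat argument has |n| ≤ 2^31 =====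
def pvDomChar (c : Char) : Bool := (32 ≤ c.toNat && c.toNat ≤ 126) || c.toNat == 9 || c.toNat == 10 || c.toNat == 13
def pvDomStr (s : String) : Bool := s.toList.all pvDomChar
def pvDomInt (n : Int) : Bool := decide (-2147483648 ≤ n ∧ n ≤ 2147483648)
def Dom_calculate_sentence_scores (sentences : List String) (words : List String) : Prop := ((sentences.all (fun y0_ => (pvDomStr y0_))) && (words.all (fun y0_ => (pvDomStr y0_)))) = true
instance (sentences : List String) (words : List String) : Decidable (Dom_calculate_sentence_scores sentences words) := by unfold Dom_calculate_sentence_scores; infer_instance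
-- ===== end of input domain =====

-- B deduplicates sentences with a multiplicity map, lowercases each distinct sentence once and
-- scans the word list once per distinct sentence (multiplying the hit count by the multiplicity),
-- instead of A's per-(sentence, word) scan that recomputes sentence.lower() for every word.

-- ===== PORT A =====
def calculate_sentence_scores (sentences : List String) (words : List String) : List (String × Int) :=
  (sentences.foldl (fun d sentence =>
      words.foldl (fun d word =>
        if PySem.Str.isIn word (PySem.Str.lower sentence) then
          if d.contains sentence then d.insert sentence (d.getD sentence 0 + 1)
          else d.insert sentence 1
        else d) d)
    PySem.Dict.empty).items

-- ===== PORT B =====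
def calculate_sentence_scores_alt (sentences : List String) (words : List String) : List (String × Int) :=
  let mult := sentences.foldl (fun d s => d.insert s (d.getD s 0 + 1)) PySem.Dict.empty
  (mult.items.foldl (fun r p =>
      let low := PySem.Str.lower p.1
      let hits := words.foldl (fun c w => if PySem.Str.isIn w low then c + 1 else c) (0 : Int)
      if hits ≠ 0 then r.insert p.1 (hits * p.2) else r)
    PySem.Dict.empty).items

-- ===== PRECONDITION & SPEC =====
def Spec_calculate_sentence_scores (sentences : List String) (words : List String) (out : List (String × Int)) : Prop := out = calculate_sentence_scores_alt sentences words
instance (sentences : List String) (words : List String) (out : List (String × Int)) : Decidable (Spec_calculate_sentence_scores sentences words out) := by unfold Spec_calculate_sentence_scores; infer_instance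

-- ===== CLAIM (what is proved, stated in full; the proofs are below) =====
def Claim_equal_calculate_sentence_scores : Prop := ∀ (sentences : List String) (words : List String), Dom_calculate_sentence_scores sentences words → Spec_calculate_sentence_scores sentences words (calculate_sentence_scores sentences words)

-- ===== LEMMAS AND PROOFS =====

-- number of words occurring (as substrings) in the lowercased sentence
def matchCount (words : List String) (s : String) : Nat :=
  words.countP (fun w => PySem.Str.isIn w (PySem.Str.lower s))

-- the common characterisation of both dicts' items after processing `pre`
def targetItems (words : List String) (pre : List String) : List (String × Int) :=
  (PySem.Set.ofList pre).filterMap (fun s =>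
    if matchCount words s ≠ 0 then some (s, (matchCount words s : Int) * (pre.count s : Int)) else none)
theorem inner_loop_eq (words : List String) (s : String) (d : PySem.Dict String Int) :
    words.foldl (fun d word =>
        if PySem.Str.isIn word (PySem.Str.lower s) then
          if d.contains s then d.insert s (d.getD s 0 + 1)
          else d.insert s 1
        else d) d
      = if matchCount words s = 0 then d else d.insert s (d.getD s 0 + (matchCount words s : Nat)) := by
  induction words generalizing d with
  | nil => simp [matchCount]
  | cons w t ih =>
      rw [List.foldl_cons]
      by_cases hw : PySem.Str.isIn w (PySem.Str.lower s) = true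
      · have hms : matchCount (w :: t) s = matchCount t s + 1 := by
          unfold matchCount; rw [List.countP_cons]; simp only [hw, if_true]
        have hd' : (if d.contains s then d.insert s (d.getD s 0 + 1) else d.insert s 1)
            = d.insert s (d.getD s 0 + 1) := by
          by_cases hc : d.contains s
          · rw [if_pos hc]
          · rw [if_neg hc]
            rw [PySem.Dict.getD_of_not_contains d 0 (by simpa using hc)]
            norm_num
        rw [if_pos hw, hd', ih, hms]
        by_cases ht : matchCount t s = 0
        · rw [if_pos ht, ht, if_neg (by omega)]; norm_num
        · rw [if_neg ht, if_neg (by omega), PySem.Dict.insert_insert_self,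
              PySem.Dict.getD_insert_self]
          push_cast; ring_nf
      · have hms : matchCount (w :: t) s = matchCount t s := by
          simp only [Bool.not_eq_true] at hw
          unfold matchCount; rw [List.countP_cons]; simp only [hw]; simp
        rw [if_neg hw, ih, hms]
theorem map_fst_guard_filterMap (g : String → Int) (p : String → Prop) [DecidablePred p] (l : List String) :
    (l.filterMap (fun s => if p s then some (s, g s) else none)).map Prod.fst
      = l.filter (fun s => decide (p s)) := by
  induction l with
  | nil => rfl
  | cons a t ih => by_cases h : p a <;> simp [h, ih]

theorem map_fst_targetItems (words : List String) (pre : List String) :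
    (targetItems words pre).map Prod.fst
      = (PySem.Set.ofList pre).filter (fun s => decide (matchCount words s ≠ 0)) :=
  map_fst_guard_filterMap _ _ _

theorem nodup_fst_targetItems (words : List String) (pre : List String) :
    ((targetItems words pre).map Prod.fst).Nodup := by
  rw [map_fst_targetItems]
  exact (PySem.Set.nodup_ofList pre).filter _

theorem mem_fst_targetItems (words pre : List String) (s : String) :
    s ∈ (targetItems words pre).map Prod.fst ↔ s ∈ pre ∧ matchCount words s ≠ 0 := by
  rw [map_fst_targetItems]
  simp [List.mem_filter, PySem.Set.mem_ofList]
theorem ofList_append_singleton (pre : List String) (s : String) :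
    PySem.Set.ofList (pre ++ [s]) = PySem.Set.add (PySem.Set.ofList pre) s := by
  rw [PySem.Set.ofList_eq_foldl, PySem.Set.ofList_eq_foldl, List.foldl_append]
  rfl

theorem count_append_singleton (pre : List String) (s t : String) :
    (pre ++ [s]).count t = pre.count t + (if t = s then 1 else 0) := by
  rw [List.count_append]
  by_cases h : t = s
  · simp [h]
  · simp [h, Ne.symm h]

theorem target_append_zero (words pre : List String) (s : String)
    (h0 : matchCount words s = 0) :
    targetItems words (pre ++ [s]) = targetItems words pre := by
  unfold targetItems
  rw [ofList_append_singleton]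
  have hcongr : ∀ t ∈ PySem.Set.ofList pre,
      (if matchCount words t ≠ 0 then some (t, (matchCount words t : Int) * ((pre ++ [s]).count t : Int)) else none)
        = (if matchCount words t ≠ 0 then some (t, (matchCount words t : Int) * (pre.count t : Int)) else none) := by
    intro t _
    by_cases hm : matchCount words t = 0
    · simp [hm]
    · by_cases hts : t = s
      · subst hts; exact absurd h0 hm
      · rw [count_append_singleton, if_neg hts]; simp
  by_cases hc : PySem.Set.contains (PySem.Set.ofList pre) s
  · rw [show PySem.Set.add (PySem.Set.ofList pre) s = PySem.Set.ofList pre by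
      simp [PySem.Set.add, (PySem.Set.contains_iff _ _).mp hc]]
    exact List.filterMap_congr hcongr
  · rw [show PySem.Set.add (PySem.Set.ofList pre) s = PySem.Set.ofList pre ++ [s] by
      simp only [PySem.Set.add, hc]; simp]
    rw [List.filterMap_append, List.filterMap_congr hcongr]
    simp [h0]

theorem target_append_mem (words pre : List String) (s : String)
    (hn : matchCount words s ≠ 0) (hs : s ∈ pre) :
    targetItems words (pre ++ [s])
      = (targetItems words pre).map (fun p =>
          if p.1 == s then (s, (matchCount words s : Int) * (pre.count s : Int) + (matchCount words s : Int)) else p) := by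
  unfold targetItems
  rw [ofList_append_singleton,
    show PySem.Set.add (PySem.Set.ofList pre) s = PySem.Set.ofList pre by
      simp [PySem.Set.add, (PySem.Set.mem_ofList pre s).mpr hs],
    List.map_filterMap]
  apply List.filterMap_congr
  intro t _
  by_cases hts : t = s
  · subst hts
    rw [if_pos hn, if_pos hn]
    simp only [Option.map_some, beq_self_eq_true, if_true]
    rw [count_append_singleton, if_pos rfl]
    push_cast; ring_nf
  · rw [count_append_singleton, if_neg hts]
    by_cases hm : matchCount words t = 0
    · simp [hm]
    · rw [if_pos hm, if_pos hm]
      simp [hts]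

theorem target_append_new (words pre : List String) (s : String)
    (hn : matchCount words s ≠ 0) (hs : s ∉ pre) :
    targetItems words (pre ++ [s])
      = targetItems words pre ++ [(s, (matchCount words s : Int))] := by
  unfold targetItems
  rw [ofList_append_singleton,
    show PySem.Set.add (PySem.Set.ofList pre) s = PySem.Set.ofList pre ++ [s] by
      simp only [PySem.Set.add]
      rw [if_neg (by simp [PySem.Set.mem_ofList, hs])],
    List.filterMap_append]
  congr 1
  · apply List.filterMap_congr
    intro t ht
    have hts : t ≠ s := by
      intro h; subst h; exact hs ((PySem.Set.mem_ofList pre t).mp ht)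
    rw [count_append_singleton, if_neg hts]
    simp
  · simp only [List.filterMap_cons, List.filterMap_nil, if_pos hn]
    rw [count_append_singleton, if_pos rfl, List.count_eq_zero.mpr hs]
    norm_num
theorem outer_loop_eq (words : List String) (pre : List String) :
    pre.foldl (fun d sentence =>
      words.foldl (fun d word =>
        if PySem.Str.isIn word (PySem.Str.lower sentence) then
          if d.contains sentence then d.insert sentence (d.getD sentence 0 + 1)
          else d.insert sentence 1
        else d) d) PySem.Dict.empty
      = PySem.Dict.mk (targetItems words pre) := by
  induction pre using List.reverseRecOn with
  | nil => rfl
  | append_singleton pre s ih =>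
      rw [List.foldl_append, ih, List.foldl_cons, List.foldl_nil, inner_loop_eq]
      by_cases h0 : matchCount words s = 0
      · rw [if_pos h0, target_append_zero words pre s h0]
      · rw [if_neg h0]
        by_cases hs : s ∈ pre
        · have hcont : (PySem.Dict.mk (targetItems words pre)).contains s = true := by
            rw [PySem.Dict.contains_eq_decide_mem_keys, PySem.Dict.keys_mk]
            simp only [decide_eq_true_eq]
            exact (mem_fst_targetItems words pre s).mpr ⟨hs, h0⟩
          have hmem : (s, (matchCount words s : Int) * (pre.count s : Int)) ∈ targetItems words pre := by
            apply List.mem_filterMap.mpr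
            exact ⟨s, (PySem.Set.mem_ofList pre s).mpr hs, by rw [if_pos h0]⟩
          have hget : (PySem.Dict.mk (targetItems words pre)).getD s 0
              = (matchCount words s : Int) * (pre.count s : Int) := by
            apply PySem.Dict.getD_of_mem_items _ hmem
            rw [PySem.Dict.keys_mk]
            exact nodup_fst_targetItems words pre
          apply PySem.Dict.ext
          rw [PySem.Dict.items_insert_of_contains _ _ hcont, hget,
              target_append_mem words pre s h0 hs]
        · have hcont : (PySem.Dict.mk (targetItems words pre)).contains s = false := by
            rw [PySem.Dict.contains_eq_decide_mem_keys, PySem.Dict.keys_mk]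
            simp only [decide_eq_false_iff_not]
            exact fun h => hs ((mem_fst_targetItems words pre s).mp h).1
          have hget : (PySem.Dict.mk (targetItems words pre)).getD s 0 = 0 :=
            PySem.Dict.getD_of_not_contains _ 0 hcont
          apply PySem.Dict.ext
          rw [PySem.Dict.items_insert_of_not_contains _ _ hcont, hget,
              target_append_new words pre s h0 hs]
          norm_num
theorem foldl_count_eq (low : String) (ws : List String) (a : Int) :
    ws.foldl (fun c w => if PySem.Str.isIn w low then c + 1 else c) a
      = a + (ws.countP (fun w => PySem.Str.isIn w low) : Int) := by
  induction ws generalizing a with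
  | nil => simp
  | cons w t ih =>
      simp only [List.foldl_cons, List.countP_cons, ih]
      split_ifs with h <;> push_cast <;> ring

theorem b_loop_eq (words : List String) (l : List (String × Int)) (d : PySem.Dict String Int)
    (hfresh : ∀ p ∈ l, d.contains p.1 = false) (hnd : (l.map Prod.fst).Nodup) :
    (l.foldl (fun r p =>
        let low := PySem.Str.lower p.1
        let hits := words.foldl (fun c w => if PySem.Str.isIn w low then c + 1 else c) (0 : Int)
        if hits ≠ 0 then r.insert p.1 (hits * p.2) else r) d).items
      = d.items ++ l.filterMap (fun p =>
          if matchCount words p.1 ≠ 0 then some (p.1, (matchCount words p.1 : Int) * p.2) else none) := by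
  induction l generalizing d with
  | nil => simp
  | cons p t ih =>
      simp only [List.foldl_cons, List.filterMap_cons, List.map_cons, List.nodup_cons] at hnd ⊢
      rw [foldl_count_eq, zero_add]
      by_cases hm : matchCount words p.1 = 0
      · rw [if_neg (by simpa [matchCount] using hm), if_neg (by exact fun h => h (by simpa [matchCount] using hm))]
        exact ih d (fun q hq => hfresh q (List.mem_cons_of_mem _ hq)) hnd.2
      · have hm' : ((words.countP (fun w => PySem.Str.isIn w (PySem.Str.lower p.1)) : Int)) ≠ 0 := by
          simpa [matchCount] using hm
        rw [if_pos hm', if_pos (by simpa [matchCount] using hm)]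
        rw [ih (d.insert p.1 ((words.countP (fun w => PySem.Str.isIn w (PySem.Str.lower p.1)) : Int) * p.2))
            (fun q hq => by
              rw [PySem.Dict.contains_insert]
              have : q.1 ≠ p.1 := fun h => hnd.1 (h ▸ List.mem_map_of_mem hq)
              simp [this, hfresh q (List.mem_cons_of_mem _ hq)])
            hnd.2]
        rw [PySem.Dict.items_insert_of_not_contains d _ (hfresh p (List.mem_cons_self))]
        simp [matchCount]

theorem alt_eq_target (sentences words : List String) :
    calculate_sentence_scores_alt sentences words = targetItems words sentences := by
  unfold calculate_sentence_scores_alt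
  rw [PySem.Dict.foldl_insert_getD_add_one_eq_counter]
  rw [b_loop_eq words _ _
      (fun p _ => PySem.Dict.contains_empty p.1)
      (by rw [PySem.Dict.items_counter]
          rw [List.map_map, show (Prod.fst ∘ fun k : String => (k, (sentences.count k : Int))) = id from rfl, List.map_id]
          exact PySem.Set.nodup_ofList sentences)]
  rw [PySem.Dict.items_counter, List.filterMap_map]
  rfl

-- ===== VERDICT (by name: the statement is the Claim_ definition above) =====
theorem calculate_sentence_scores_spec : Claim_equal_calculate_sentence_scores := by
  intro sentences words _
  unfold Spec_calculate_sentence_scores calculate_sentence_scores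
  rw [outer_loop_eq, alt_eq_target]
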